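-- pv_equiv track=rewrite | github.com/Iannis863/Fundamentals-of-Programming | Assignment 1/Lab 2.py | ex13
-- ===== SOURCE A (Python) =====
-- def nrcif(n):
--     nr = 0
--     while (n):
--         nr = nr + 1
--         n = int(n / 10)
--     return nr
--
-- def ex13(n):
--     p = 1
--     digit = nrcif(n)
--     nr = 0
--     while (n):
--         if (digit % 2 == 1):
--             nr = (n % 10) * p + nr
--             p = p * 10
--         digit = digit - 1
--         n = int(n / 10)
--     return nr
-- ===== SOURCE B (Python) =====
-- def ex13(n):
--     # one extraction pass (right-to-left digits), then select odd 1-indexed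
--     # positions from the left and fold them into the result
--     digits = []
--     while n:
--         digits.append(n % 10)
--         n = int(n / 10)
--     nr = 0
--     for i, d in enumerate(reversed(digits)):
--         if i % 2 == 0:
--             nr = nr * 10 + d
--     return nr
-- ===== Notes on version B (the rewrite author's own statement) =====
-- stated objective: simpler
-- what changed: Replaced A's digit-count helper plus a downward position-counter accumulation with an ascending place value by a single extraction pass into a digit list, reverse, and a fold over every other index that shifts the result one decimal place and appends the selected digit.
import Mathlib
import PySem

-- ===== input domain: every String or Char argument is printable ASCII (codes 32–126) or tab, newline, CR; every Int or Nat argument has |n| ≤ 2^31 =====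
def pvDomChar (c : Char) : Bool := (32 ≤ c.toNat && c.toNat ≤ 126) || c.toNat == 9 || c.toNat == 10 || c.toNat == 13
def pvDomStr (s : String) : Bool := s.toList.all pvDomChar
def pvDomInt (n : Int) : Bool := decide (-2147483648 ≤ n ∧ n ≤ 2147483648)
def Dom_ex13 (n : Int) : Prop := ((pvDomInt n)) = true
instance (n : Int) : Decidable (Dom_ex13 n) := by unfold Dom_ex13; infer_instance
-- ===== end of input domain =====

-- B replaces A's digit-count helper plus position-counter loop by one extraction pass into a
-- list followed by a select-and-fold over the reversed list (objective: simpler decomposition).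

-- termination measure used by all the while-loops on n (int(n/10) shrinks |n|)
theorem pv_truncdiv10_lt (n : Int) (h : ¬ n = 0) :
    (PySem.Int.truncdiv n 10).natAbs < n.natAbs := by
  have : PySem.Int.truncdiv n 10 = Int.tdiv n 10 := rfl
  rw [this]
  rcases Int.lt_or_lt_of_ne h with hn | hn
  · rw [Int.natAbs_tdiv]; exact Nat.div_lt_self (by omega) (by omega)
  · rw [Int.natAbs_tdiv]; exact Nat.div_lt_self (by omega) (by omega)

-- ===== PORT A =====
def nrcifGo (n nr : Int) : Int :=
  if h : n ≠ 0 then nrcifGo (PySem.Int.truncdiv n 10) (nr + 1) else nr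
termination_by n.natAbs
decreasing_by exact pv_truncdiv10_lt n h

def nrcif (n : Int) : Int := nrcifGo n 0

def ex13Loop (n digit p nr : Int) : Int :=
  if h : n ≠ 0 then
    if PySem.Int.mod digit 2 == 1 then
      ex13Loop (PySem.Int.truncdiv n 10) (digit - 1) (p * 10) (PySem.Int.mod n 10 * p + nr)
    else
      ex13Loop (PySem.Int.truncdiv n 10) (digit - 1) p nr
  else nr
termination_by n.natAbs
decreasing_by all_goals exact pv_truncdiv10_lt n h

def ex13 (n : Int) : Int := ex13Loop n (nrcif n) 1 0

-- ===== PORT B =====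
def digitsLoop (n : Int) (digits : List Int) : List Int :=
  if h : n ≠ 0 then digitsLoop (PySem.Int.truncdiv n 10) (digits ++ [PySem.Int.mod n 10])
  else digits
termination_by n.natAbs
decreasing_by exact pv_truncdiv10_lt n h

def ex13_alt (n : Int) : Int :=
  let digits := digitsLoop n []
  (PySem.List.enumerate digits.reverse).foldl
    (fun nr pr => if PySem.Int.mod pr.1 2 == 0 then nr * 10 + pr.2 else nr) 0

-- ===== PRECONDITION & SPEC =====
def Spec_ex13 (n : Int) (out : Int) : Prop := out = ex13_alt n
instance (n : Int) (out : Int) : Decidable (Spec_ex13 n out) := by unfold Spec_ex13; infer_instance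

-- ===== CLAIM (what is proved, stated in full; the proofs are below) =====
def Claim_equal_ex13 : Prop := ∀ (n : Int), Dom_ex13 n → Spec_ex13 n (ex13 n)

-- ===== LEMMAS AND PROOFS =====

-- right-to-left digit list of n, the common reference object of both proofs
def dr (n : Int) : List Int :=
  if h : n ≠ 0 then PySem.Int.mod n 10 :: dr (PySem.Int.truncdiv n 10) else []
termination_by n.natAbs
decreasing_by exact pv_truncdiv10_lt n h

-- value of the digits at odd counter positions, counter counting down from c
def g (ds : List Int) (c : Int) : Int :=
  match ds with
  | [] => 0
  | d :: t => if PySem.Int.mod c 2 == 1 then d + 10 * g t (c - 1) else g t (c - 1)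

theorem nrcifGo_eq (n nr : Int) : nrcifGo n nr = nr + ((dr n).length : Int) := by
  fun_induction nrcifGo n nr with
  | case1 n nr h ih => rw [dr, dif_pos h]; simp at ih ⊢; omega
  | case2 n nr h => rw [dr, dif_neg h]; simp

theorem ex13Loop_eq (n digit p nr : Int) :
    ex13Loop n digit p nr = p * g (dr n) digit + nr := by
  fun_induction ex13Loop n digit p nr with
  | case1 n digit p nr h hc ih => rw [dr, dif_pos h]; simp only [g, hc, if_pos]; rw [ih]; ring
  | case2 n digit p nr h hc ih =>
      rw [dr, dif_pos h]; simp only [g]; rw [if_neg (by simpa using hc)]; rw [ih]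
  | case3 n digit p nr h => rw [dr, dif_neg h]; simp [g]

theorem digitsLoop_eq (n : Int) (acc : List Int) : digitsLoop n acc = acc ++ dr n := by
  fun_induction digitsLoop n acc with
  | case1 n acc h ih => rw [dr, dif_pos h]; rw [ih]; simp
  | case2 n acc h => rw [dr, dif_neg h]; simp

theorem foldB_reverse (ds : List Int) :
    (PySem.List.enumerate ds.reverse).foldl
      (fun nr pr => if PySem.Int.mod pr.1 2 == 0 then nr * 10 + pr.2 else nr) 0
      = g ds (ds.length : Int) := by
  induction ds with
  | nil => simp [PySem.List.enumerate_nil, g]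
  | cons d t ih =>
      rw [List.reverse_cons, PySem.List.enumerate_append, List.foldl_append, ih]
      simp only [PySem.List.enumerate_cons, PySem.List.enumerate_nil, List.foldl_cons,
        List.foldl_nil, List.length_reverse, g, List.length_cons]
      have hmod : ∀ (c : Int), PySem.Int.mod c 2 = c % 2 :=
        fun c => PySem.Int.mod_eq_emod_of_pos (by omega)
      have hc : ((t.length + 1 : Nat) : Int) - 1 = (t.length : Int) := by push_cast; ring
      have hc2 : (0 : Int) + (t.length : Int) = (t.length : Int) := by ring
      rw [hmod, hmod, hc, hc2]
      by_cases hp : (t.length : Int) % 2 = 0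
      · rw [if_pos (by simp [hp]), if_pos (by push_cast; simp; omega)]; ring
      · rw [if_neg (by simp [hp]), if_neg (by push_cast; simp; omega)]

-- ===== VERDICT (by name: the statement is the Claim_ definition above) =====
theorem ex13_spec : Claim_equal_ex13 := by
  intro n _
  show ex13 n = ex13_alt n
  rw [ex13, ex13_alt, ex13Loop_eq, nrcif, nrcifGo_eq, digitsLoop_eq]
  simp only [List.nil_append, foldB_reverse]
  ring
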